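-- pv_equiv track=rewrite | github.com/Drakvor/OSS-Knowledge_BrainClone | oss-knowledge-embedding-server/app/benchmark/strategies/entity_centric.py | _determine_primary_entity
-- ===== SOURCE A (Python) =====
-- from typing import List, Tuple, Dict, Any, Set
--
-- def _determine_primary_entity(entities: Dict[str, List[str]]) -> Tuple[str, str]:
--     """Determine the primary entity for a row"""
--
--     # Priority order for entity types
--     priority_order = ["ticket_id", "user_id", "asset_id", "system_id"]
--
--     for entity_type in priority_order:
--         if entity_type in entities and entities[entity_type]:
--             return entity_type, entities[entity_type][0]  # Take first entity of this type
--
--     # If no priority entities, take any available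
--     for entity_type, entity_list in entities.items():
--         if entity_list:
--             return entity_type, entity_list[0]
--
--     return None, None
-- ===== SOURCE B (Python) =====
-- def _determine_primary_entity(entities):
--     """Determine the primary entity for a row"""
--     priority_order = ["ticket_id", "user_id", "asset_id", "system_id"]
--     # Single pass over the dict items: give every non-empty entry a numeric rank
--     # (its index in priority_order, or len(priority_order)+position for the rest)
--     # and keep the entry with the smallest rank seen so far (argmin selection).
--     best = None  # (rank, entity_type, first_entity)
--     for pos, (entity_type, entity_list) in enumerate(entities.items()):
--         if not entity_list:
--             continue
--         if entity_type in priority_order: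
--             rank = priority_order.index(entity_type)
--         else:
--             rank = len(priority_order) + pos
--         if best is None or rank < best[0]:
--             best = (rank, entity_type, entity_list[0])
--     if best is None:
--         return None, None
--     return best[1], best[2]
-- ===== Notes on version B (the rewrite author's own statement) =====
-- stated objective: alternative
-- what changed: Replaces A's two early-return scans (priority list, then dict items) by a single argmin pass over the dict items that assigns each non-empty entry a numeric rank (priority index, or len(priority)+position) and keeps the minimum.
import Mathlib
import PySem

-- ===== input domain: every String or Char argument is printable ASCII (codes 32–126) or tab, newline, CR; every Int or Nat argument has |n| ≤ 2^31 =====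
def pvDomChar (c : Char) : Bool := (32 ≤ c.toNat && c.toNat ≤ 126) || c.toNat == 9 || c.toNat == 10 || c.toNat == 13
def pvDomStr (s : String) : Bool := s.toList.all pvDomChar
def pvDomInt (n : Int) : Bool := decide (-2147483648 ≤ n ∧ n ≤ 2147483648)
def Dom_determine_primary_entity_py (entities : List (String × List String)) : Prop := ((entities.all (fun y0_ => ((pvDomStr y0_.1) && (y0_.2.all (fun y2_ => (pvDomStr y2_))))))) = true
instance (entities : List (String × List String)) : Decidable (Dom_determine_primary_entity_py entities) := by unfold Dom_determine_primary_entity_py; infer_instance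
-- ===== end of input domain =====

-- B replaces A's two early-return scans by a single argmin pass over the dict items:
-- each non-empty entry gets a numeric rank (priority index, else 4 + position) and the
-- minimum-rank entry is kept; alternative decomposition, same result.


-- the priority_order constant both Pythons share
def pvPrio : List String := ["ticket_id", "user_id", "asset_id", "system_id"]

-- ===== PORT A =====
-- A's first loop: over priority_order, guarded by 'entity_type in entities and entities[entity_type]'
def pvAFind1 (d : PySem.Dict String (List String)) : List String → Option (String × String)
  | [] => none
  | t :: ts =>
    if d.contains t ∧ d.getD t [] ≠ [] then
      some (t, PySem.List.pyGetD (d.getD t []) 0 "")   -- entities[entity_type][0]; list proven nonempty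
    else pvAFind1 d ts

-- A's second loop: over entities.items()
def pvAFind2 : List (String × List String) → Option (String × String)
  | [] => none
  | (t, l) :: rest =>
    if l ≠ [] then some (t, PySem.List.pyGetD l 0 "") else pvAFind2 rest

def determine_primary_entity_py (entities : List (String × List String)) : Option String × Option String :=
  match pvAFind1 (PySem.Dict.ofList entities) pvPrio with
  | some (t, v) => (some t, some v)
  | none =>
    match pvAFind2 (PySem.Dict.ofList entities).items with
    | some (t, v) => (some t, some v)
    | none => (none, none)

-- ===== PORT B =====
-- rank of an entry: priority_order.index(k) if k in priority_order else len(priority_order) + pos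
def pvRank (pos : Int) (k : String) : Int :=
  match PySem.List.index? pvPrio k with
  | some i => (i : Int)
  | none => 4 + pos

-- B's loop body: skip empty lists, keep the strictly smaller rank (argmin; first one wins)
def pvStep (acc : Option (Int × String × String)) (x : Int × String × List String) :
    Option (Int × String × String) :=
  match x.2.2 with
  | [] => acc
  | v :: _ =>
    let r := pvRank x.1 x.2.1
    match acc with
    | none => some (r, x.2.1, v)
    | some b => if r < b.1 then some (r, x.2.1, v) else some b

def determine_primary_entity_py_alt (entities : List (String × List String)) : Option String × Option String :=
  match (PySem.List.enumerate (PySem.Dict.ofList entities).items 0).foldl pvStep none with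
  | none => (none, none)
  | some (_, k, v) => (some k, some v)

-- ===== PRECONDITION & SPEC =====
def Spec_determine_primary_entity_py (entities : List (String × List String)) (out : Option String × Option String) : Prop := out = determine_primary_entity_py_alt entities
instance (entities : List (String × List String)) (out : Option String × Option String) : Decidable (Spec_determine_primary_entity_py entities out) := by unfold Spec_determine_primary_entity_py; infer_instance

-- ===== CLAIM (what is proved, stated in full; the proofs are below) =====
def Claim_equal_determine_primary_entity_py : Prop := ∀ (entities : List (String × List String)), Dom_determine_primary_entity_py entities → Spec_determine_primary_entity_py entities (determine_primary_entity_py entities)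

-- ===== LEMMAS AND PROOFS =====

-- Characterization of B's fold: the result is (the start accumulator or) a non-empty entry
-- carrying its own rank, and its rank bounds every non-empty entry's rank and the accumulator's.
theorem pvFold_isBest (L : List (Int × String × List String))
    (acc : Option (Int × String × String)) :
    match L.foldl pvStep acc with
    | none => acc = none ∧ ∀ x ∈ L, x.2.2 = []
    | some b =>
        (acc = some b ∨ ∃ x ∈ L, ∃ t, x.2.2 = b.2.2 :: t ∧ b.1 = pvRank x.1 x.2.1 ∧ b.2.1 = x.2.1)
        ∧ (∀ x ∈ L, x.2.2 ≠ [] → b.1 ≤ pvRank x.1 x.2.1)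
        ∧ (∀ b', acc = some b' → b.1 ≤ b'.1) := by
  induction L generalizing acc with
  | nil =>
    cases acc with
    | none => exact ⟨rfl, by simp⟩
    | some b =>
      refine ⟨Or.inl rfl, by simp, ?_⟩
      intro b' h
      cases h
      exact le_refl _
  | cons x L ih =>
    obtain ⟨pos, k, lst⟩ := x
    rw [List.foldl_cons]
    cases lst with
    | nil =>
      have hstep : pvStep acc (pos, k, []) = acc := rfl
      rw [hstep]
      have H := ih acc
      cases hF : List.foldl pvStep acc L with
      | none =>
        rw [hF] at H
        refine ⟨H.1, ?_⟩
        intro y hy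
        rcases List.mem_cons.mp hy with rfl | hy'
        · rfl
        · exact H.2 y hy'
      | some b =>
        rw [hF] at H
        refine ⟨?_, ?_, H.2.2⟩
        · rcases H.1 with h | ⟨y, hy, t, ht⟩
          · exact Or.inl h
          · exact Or.inr ⟨y, List.mem_cons_of_mem _ hy, t, ht⟩
        · intro y hy hne
          rcases List.mem_cons.mp hy with rfl | hy'
          · exact absurd rfl hne
          · exact H.2.1 y hy' hne
    | cons v tl =>
      cases acc with
      | none =>
        have hstep : pvStep none (pos, k, v :: tl) = some (pvRank pos k, k, v) := rfl
        rw [hstep]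
        have H := ih (some (pvRank pos k, k, v))
        cases hF : List.foldl pvStep (some (pvRank pos k, k, v)) L with
        | none =>
          rw [hF] at H
          exact absurd H.1 (by simp)
        | some b =>
          rw [hF] at H
          refine ⟨?_, ?_, ?_⟩
          · rcases H.1 with h | ⟨y, hy, t, ht⟩
            · obtain rfl := Option.some.inj h
              exact Or.inr ⟨(pos, k, v :: tl), List.mem_cons_self, tl, rfl, rfl, rfl⟩
            · exact Or.inr ⟨y, List.mem_cons_of_mem _ hy, t, ht⟩
          · intro y hy hne
            rcases List.mem_cons.mp hy with rfl | hy'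
            · exact H.2.2 _ rfl
            · exact H.2.1 y hy' hne
          · intro b' h
            cases h
      | some a =>
        by_cases hlt : pvRank pos k < a.1
        · have hstep : pvStep (some a) (pos, k, v :: tl) = some (pvRank pos k, k, v) := by
            simp [pvStep, hlt]
          rw [hstep]
          have H := ih (some (pvRank pos k, k, v))
          cases hF : List.foldl pvStep (some (pvRank pos k, k, v)) L with
          | none =>
            rw [hF] at H
            exact absurd H.1 (by simp)
          | some b =>
            rw [hF] at H
            refine ⟨?_, ?_, ?_⟩
            · rcases H.1 with h | ⟨y, hy, t, ht⟩
              · obtain rfl := Option.some.inj h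
                exact Or.inr ⟨(pos, k, v :: tl), List.mem_cons_self, tl, rfl, rfl, rfl⟩
              · exact Or.inr ⟨y, List.mem_cons_of_mem _ hy, t, ht⟩
            · intro y hy hne
              rcases List.mem_cons.mp hy with rfl | hy'
              · exact H.2.2 _ rfl
              · exact H.2.1 y hy' hne
            · intro b' h
              obtain rfl := Option.some.inj h
              have h1 : b.1 ≤ pvRank pos k := H.2.2 _ rfl
              exact le_of_lt (lt_of_le_of_lt h1 hlt)
        · have hstep : pvStep (some a) (pos, k, v :: tl) = some a := by
            simp [pvStep, hlt]
          rw [hstep]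
          have H := ih (some a)
          cases hF : List.foldl pvStep (some a) L with
          | none =>
            rw [hF] at H
            exact absurd H.1 (by simp)
          | some b =>
            rw [hF] at H
            refine ⟨?_, ?_, ?_⟩
            · rcases H.1 with h | ⟨y, hy, t, ht⟩
              · exact Or.inl h
              · exact Or.inr ⟨y, List.mem_cons_of_mem _ hy, t, ht⟩
            · intro y hy hne
              rcases List.mem_cons.mp hy with rfl | hy'
              · exact le_trans (H.2.2 _ rfl) (not_lt.mp hlt)
              · exact H.2.1 y hy' hne
            · exact H.2.2
  -- end pvFold_isBest

-- Distinct non-empty entries of a nodup-keyed item list have distinct ranks.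
theorem pvRank_inj (I : List (String × List String)) (hndf : (I.map Prod.fst).Nodup)
    (k1 k2 : Nat) (h1 : k1 < I.length) (h2 : k2 < I.length)
    (h : pvRank (k1 : Int) I[k1].1 = pvRank (k2 : Int) I[k2].1) : k1 = k2 := by
  unfold pvRank at h
  cases hi1 : PySem.List.index? pvPrio I[k1].1 with
  | some i1 =>
    obtain ⟨hl1, he1, -⟩ := PySem.List.getElem_of_index?_eq_some hi1
    cases hi2 : PySem.List.index? pvPrio I[k2].1 with
    | some i2 =>
      obtain ⟨hl2, he2, -⟩ := PySem.List.getElem_of_index?_eq_some hi2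
      simp only [hi1, hi2] at h
      have hii : i1 = i2 := by exact_mod_cast h
      subst hii
      have hkey : I[k1].1 = I[k2].1 := he1.symm.trans he2
      have hm : (I.map Prod.fst)[k1]'(by simpa using h1) = (I.map Prod.fst)[k2]'(by simpa using h2) := by
        simpa using hkey
      exact (List.Nodup.getElem_inj_iff hndf).mp hm
    | none =>
      simp only [hi1, hi2] at h
      have hlen : pvPrio.length = 4 := rfl
      rw [hlen] at hl1
      omega
  | none =>
    cases hi2 : PySem.List.index? pvPrio I[k2].1 with
    | some i2 =>
      obtain ⟨hl2, he2, -⟩ := PySem.List.getElem_of_index?_eq_some hi2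
      simp only [hi1, hi2] at h
      have hlen : pvPrio.length = 4 := rfl
      rw [hlen] at hl2
      omega
    | none =>
      simp only [hi1, hi2] at h
      omega

-- If entry kA is non-empty and of minimal rank among the non-empty entries, B's fold finds it.
theorem pvArgmin_unique (I : List (String × List String)) (hndf : (I.map Prod.fst).Nodup)
    (kA : Nat) (hkA : kA < I.length) (hneA : I[kA].2 ≠ [])
    (hminA : ∀ j (hj : j < I.length), I[j].2 ≠ [] → pvRank (kA : Int) I[kA].1 ≤ pvRank (j : Int) I[j].1) :
    (PySem.List.enumerate I 0).foldl pvStep none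
      = some (pvRank (kA : Int) I[kA].1, I[kA].1, PySem.List.pyGetD I[kA].2 0 "") := by
  have hxA : ((0 : Int) + (kA : Int), I[kA]) ∈ PySem.List.enumerate I 0 :=
    (PySem.List.mem_enumerate_iff _ _ _).mpr ⟨kA, hkA, rfl⟩
  have H := pvFold_isBest (PySem.List.enumerate I 0) none
  cases hF : (PySem.List.enumerate I 0).foldl pvStep none with
  | none =>
    rw [hF] at H
    exact absurd (H.2 _ hxA) hneA
  | some b =>
    rw [hF] at H
    obtain ⟨b1, b2, b3⟩ := b
    rcases H.1 with h | ⟨x, hx, t', ht', hbr, hbk⟩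
    · simp at h
    · obtain ⟨j, hj, hxeq⟩ := (PySem.List.mem_enumerate_iff _ _ _).mp hx
      subst hxeq
      have hI2 : I[j].2 = b3 :: t' := ht'
      have hnej : I[j].2 ≠ [] := by rw [hI2]; exact List.cons_ne_nil _ _
      have hble : b1 ≤ pvRank (kA : Int) I[kA].1 := by
        have h2 := H.2.1 _ hxA hneA
        simpa using h2
      have hbr' : b1 = pvRank (j : Int) I[j].1 := by simpa using hbr
      have hAle : pvRank (kA : Int) I[kA].1 ≤ pvRank (j : Int) I[j].1 := hminA j hj hnej
      have heq : pvRank (kA : Int) I[kA].1 = pvRank (j : Int) I[j].1 :=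
        le_antisymm hAle (hbr' ▸ hble)
      obtain rfl : kA = j := pvRank_inj I hndf kA j hkA hj heq
      have hb2 : b2 = I[kA].1 := by simpa using hbk
      have hb3 : PySem.List.pyGetD I[kA].2 0 "" = b3 := by
        rw [hI2]; simp [PySem.List.pyGetD]
      rw [hbr', hb2, ← hb3]
  -- end pvArgmin_unique

-- A's first loop succeeds: the witness is in the dict, non-empty, of minimal priority index.
theorem pvFind1_some (d : PySem.Dict String (List String)) (ps : List String) (t v : String)
    (h : pvAFind1 d ps = some (t, v)) :
    ∃ lst, d.get? t = some lst ∧ lst ≠ [] ∧ v = PySem.List.pyGetD lst 0 "" ∧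
      ∃ iT, PySem.List.index? ps t = some iT ∧
        ∀ k l, k ∈ ps → d.get? k = some l → l ≠ [] →
          ∃ ik, PySem.List.index? ps k = some ik ∧ iT ≤ ik := by
  induction ps with
  | nil => simp [pvAFind1] at h
  | cons p ps ih =>
    by_cases hg : d.contains p ∧ d.getD p [] ≠ []
    · have hh : p = t ∧ PySem.List.pyGetD (d.getD p []) 0 "" = v := by
        simpa [pvAFind1, hg] using h
      obtain ⟨rfl, hv⟩ := hh
      have hsome : (d.get? p).isSome = true := by
        rw [← PySem.Dict.contains_eq_isSome_get?]; exact hg.1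
      obtain ⟨lst, hq⟩ := Option.isSome_iff_exists.mp hsome
      have hgd : d.getD p [] = lst := PySem.Dict.getD_of_get?_eq_some d [] hq
      refine ⟨lst, hq, by rw [← hgd]; exact hg.2, by rw [← hv, hgd], 0,
        PySem.List.index?_cons_self p ps, ?_⟩
      intro k l hk _ _
      obtain ⟨ik, hik⟩ := Option.isSome_iff_exists.mp
        ((PySem.List.index?_isSome_iff _ _).mpr hk)
      exact ⟨ik, hik, Nat.zero_le _⟩
    · have h' : pvAFind1 d ps = some (t, v) := by simpa [pvAFind1, hg] using h
      obtain ⟨lst, hq, hne, hv, iT, hiT, hmin⟩ := ih h'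
      have hpx : ∀ l : List String, d.get? p = some l → l = [] := by
        intro l hql
        by_contra hnel
        have hc : d.contains p = true := by rw [PySem.Dict.contains_eq_isSome_get?, hql]; rfl
        have hgd : d.getD p [] = l := PySem.Dict.getD_of_get?_eq_some d [] hql
        exact hg ⟨hc, by rw [hgd]; exact hnel⟩
      have hpt : p ≠ t := by
        rintro rfl
        exact hne (hpx lst hq)
      refine ⟨lst, hq, hne, hv, iT + 1, ?_, ?_⟩
      · rw [PySem.List.index?_cons_of_ne ps hpt, hiT]; rfl
      · intro k l hk hql hnel
        have hpk : p ≠ k := by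
          rintro rfl
          exact hnel (hpx l hql)
        have hk' : k ∈ ps := by
          rcases List.mem_cons.mp hk with rfl | hk'
          · exact absurd rfl hpk
          · exact hk'
        obtain ⟨ik, hik, hle⟩ := hmin k l hk' hql hnel
        refine ⟨ik + 1, ?_, Nat.succ_le_succ hle⟩
        rw [PySem.List.index?_cons_of_ne ps hpk, hik]; rfl

-- A's first loop fails: every priority key is absent or empty.
theorem pvFind1_none (d : PySem.Dict String (List String)) (ps : List String)
    (h : pvAFind1 d ps = none) :
    ∀ k ∈ ps, d.get? k = none ∨ d.get? k = some [] := by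
  induction ps with
  | nil => simp
  | cons p ps ih =>
    by_cases hg : d.contains p ∧ d.getD p [] ≠ []
    · simp [pvAFind1, hg] at h
    · intro k hk
      rcases List.mem_cons.mp hk with rfl | hk'
      · cases hq : d.get? k with
        | none => exact Or.inl rfl
        | some l =>
          right
          have hc : d.contains k = true := by rw [PySem.Dict.contains_eq_isSome_get?, hq]; rfl
          have hgd : d.getD k [] = l := PySem.Dict.getD_of_get?_eq_some d [] hq
          have : l = [] := by
            by_contra hne
            exact hg ⟨hc, by rw [hgd]; exact hne⟩
          rw [this]
      · have h' : pvAFind1 d ps = none := by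
          simpa [pvAFind1, hg] using h
        exact ih h' k hk'

-- A's second loop succeeds: the witness is the first non-empty item.
theorem pvFind2_some (l : List (String × List String)) (t v : String)
    (h : pvAFind2 l = some (t, v)) :
    ∃ l1 lst l2, l = l1 ++ (t, lst) :: l2 ∧ lst ≠ [] ∧ v = PySem.List.pyGetD lst 0 "" ∧
      ∀ x ∈ l1, x.2 = [] := by
  induction l with
  | nil => simp [pvAFind2] at h
  | cons kv rest ih =>
    obtain ⟨p, pl⟩ := kv
    by_cases hne : pl = []
    · have h' : pvAFind2 rest = some (t, v) := by simpa [pvAFind2, hne] using h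
      obtain ⟨l1, lst, l2, heq, hlst, hv, hemp⟩ := ih h'
      refine ⟨(p, pl) :: l1, lst, l2, by simp [heq], hlst, hv, ?_⟩
      intro x hx
      rcases List.mem_cons.mp hx with rfl | hx'
      · exact hne
      · exact hemp x hx'
    · have hh : p = t ∧ PySem.List.pyGetD pl 0 "" = v := by
        simpa [pvAFind2, hne] using h
      obtain ⟨rfl, hv⟩ := hh
      exact ⟨[], pl, rest, rfl, hne, hv.symm, by simp⟩

-- A's second loop fails: every item is empty.
theorem pvFind2_none (l : List (String × List String)) (h : pvAFind2 l = none) :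
    ∀ x ∈ l, x.2 = [] := by
  induction l with
  | nil => simp
  | cons kv rest ih =>
    obtain ⟨t, vl⟩ := kv
    intro x hx
    by_cases hv : vl = []
    · rcases List.mem_cons.mp hx with rfl | hx'
      · exact hv
      · have h' : pvAFind2 rest = none := by simpa [pvAFind2, hv] using h
        exact ih h' x hx'
    · simp [pvAFind2, hv] at h

-- ===== VERDICT (by name: the statement is the Claim_ definition above) =====
theorem determine_primary_entity_py_spec : Claim_equal_determine_primary_entity_py := by
  intro entities _
  unfold Spec_determine_primary_entity_py determine_primary_entity_py determine_primary_entity_py_alt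
  set d := PySem.Dict.ofList entities with hd
  have hnd : d.keys.Nodup := PySem.Dict.nodup_keys_ofList entities
  have hndf : (d.items.map Prod.fst).Nodup := hnd
  have hGet : ∀ p ∈ d.items, d.get? p.1 = some p.2 := by
    intro p hp
    exact PySem.Dict.get?_of_mem_items d hp hnd
  cases h1 : pvAFind1 d pvPrio with
  | some tv =>
    obtain ⟨t, v⟩ := tv
    obtain ⟨lstA, hqA, hneA, hvA, iT, hiT, hminP⟩ := pvFind1_some d pvPrio t v h1
    have hmemA : (t, lstA) ∈ d.items := PySem.Dict.mem_items_of_get?_eq_some d hqA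
    obtain ⟨kA, hkA, hIkA⟩ := List.getElem_of_mem hmemA
    have hkeyA : (d.items[kA]'hkA).1 = t := by rw [hIkA]
    have hlstA : (d.items[kA]'hkA).2 = lstA := by rw [hIkA]
    have hrankA : pvRank (kA : Int) (d.items[kA]'hkA).1 = (iT : Int) := by
      rw [hkeyA]; unfold pvRank; simp only [hiT]
    have hiT4 : iT < 4 := by
      obtain ⟨hl, -, -⟩ := PySem.List.getElem_of_index?_eq_some hiT
      simpa [pvPrio] using hl
    have hminA : ∀ j (hj : j < d.items.length), (d.items[j]'hj).2 ≠ [] →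
        pvRank (kA : Int) (d.items[kA]'hkA).1 ≤ pvRank (j : Int) (d.items[j]'hj).1 := by
      intro j hj hnej
      have hqj := hGet _ (d.items.getElem_mem hj)
      rw [hrankA]
      cases hij : PySem.List.index? pvPrio (d.items[j]'hj).1 with
      | some ij =>
        have hrj : pvRank (j : Int) (d.items[j]'hj).1 = (ij : Int) := by
          unfold pvRank; simp only [hij]
        have hmemP : (d.items[j]'hj).1 ∈ pvPrio :=
          (PySem.List.index?_isSome_iff _ _).mp (by rw [hij]; rfl)
        obtain ⟨ik, hik, hle⟩ := hminP _ _ hmemP hqj hnej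
        rw [hij] at hik
        obtain rfl := Option.some.inj hik
        rw [hrj]
        exact_mod_cast hle
      | none =>
        have hrj : pvRank (j : Int) (d.items[j]'hj).1 = 4 + (j : Int) := by
          unfold pvRank; simp only [hij]
        rw [hrj]
        omega
    have hfold := pvArgmin_unique d.items hndf kA hkA (by rw [hlstA]; exact hneA) hminA
    rw [hfold, hrankA, hkeyA, hlstA, ← hvA]
  | none =>
    cases h2 : pvAFind2 d.items with
    | some tv =>
      obtain ⟨t, v⟩ := tv
      obtain ⟨l1, lstA, l2, hIeq, hneA, hvA, hemp⟩ := pvFind2_some d.items t v h2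
      have hk1 := pvFind1_none d pvPrio h1
      have hnotP : ∀ (k : String) (l : List String), d.get? k = some l → l ≠ [] → k ∉ pvPrio := by
        intro k l hql hnel hkP
        rcases hk1 k hkP with hn | he
        · rw [hql] at hn; simp at hn
        · rw [hql] at he
          exact hnel (Option.some.inj he)
      have hkA : l1.length < d.items.length := by rw [hIeq]; simp
      have hIkA : d.items[l1.length]'hkA = (t, lstA) := by
        rw [List.getElem_of_eq hIeq, List.getElem_append_right (le_refl _)]
        simp
      have hkeyA : (d.items[l1.length]'hkA).1 = t := by rw [hIkA]
      have hlstA : (d.items[l1.length]'hkA).2 = lstA := by rw [hIkA]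
      have hqA : d.get? t = some lstA := hGet (t, lstA) (by rw [hIeq]; simp)
      have htP : PySem.List.index? pvPrio t = none :=
        (PySem.List.index?_eq_none_iff _ _).mpr (hnotP t lstA hqA hneA)
      have hminA : ∀ j (hj : j < d.items.length), (d.items[j]'hj).2 ≠ [] →
          pvRank (l1.length : Int) (d.items[l1.length]'hkA).1 ≤ pvRank (j : Int) (d.items[j]'hj).1 := by
        intro j hj hnej
        have hqj := hGet _ (d.items.getElem_mem hj)
        have hjP : PySem.List.index? pvPrio (d.items[j]'hj).1 = none :=
          (PySem.List.index?_eq_none_iff _ _).mpr (hnotP _ _ hqj hnej)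
        have hrj : pvRank (j : Int) (d.items[j]'hj).1 = 4 + (j : Int) := by
          unfold pvRank; simp only [hjP]
        have hrA : pvRank (l1.length : Int) (d.items[l1.length]'hkA).1 = 4 + (l1.length : Int) := by
          rw [hkeyA]; unfold pvRank; simp only [htP]
        rw [hrj, hrA]
        have hlej : l1.length ≤ j := by
          by_contra hlt
          push Not at hlt
          have hmem : d.items[j]'hj ∈ l1 := by
            rw [List.getElem_of_eq hIeq, List.getElem_append_left hlt]
            exact List.getElem_mem _
          exact hnej (hemp _ hmem)
        omega
      have hfold := pvArgmin_unique d.items hndf l1.length hkA (by rw [hlstA]; exact hneA) hminA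
      rw [hfold, hkeyA, hlstA, ← hvA]
    | none =>
      have hall := pvFind2_none d.items h2
      have H := pvFold_isBest (PySem.List.enumerate d.items 0) none
      cases hF : (PySem.List.enumerate d.items 0).foldl pvStep none with
      | none => rfl
      | some b =>
        rw [hF] at H
        rcases H.1 with h | ⟨x, hx, t', ht', -, -⟩
        · simp at h
        · obtain ⟨j, hj, hxeq⟩ := (PySem.List.mem_enumerate_iff _ _ _).mp hx
          subst hxeq
          have hI2 : (d.items[j]'hj).2 = b.2.2 :: t' := ht'
          have hj2 : (d.items[j]'hj).2 = [] := hall _ (d.items.getElem_mem hj)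
          rw [hj2] at hI2
          simp at hI2
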